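-- pv_equiv track=rewrite | github.com/Beliavsky/Pure-Fortran | xspace.py | squeeze_paren_spaces
-- ===== SOURCE A (Python) =====
-- from typing import Dict, Iterable, List, Optional, Set, Tuple
--
-- def squeeze_paren_spaces(code: str) -> str:
--     """Remove spaces immediately after '(' and before ')' outside quoted strings."""
--     out: List[str] = []
--     in_single = False
--     in_double = False
--     i = 0
--     while i < len(code):
--         ch = code[i]
--         if ch == "'" and not in_double:
--             in_single = not in_single
--             out.append(ch)
--             i += 1
--             continue
--         if ch == '"' and not in_single:
--             in_double = not in_double
--             out.append(ch)
--             i += 1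
--             continue
--         if not in_single and not in_double:
--             if ch == "(":
--                 out.append(ch)
--                 i += 1
--                 while i < len(code) and code[i] == " ":
--                     i += 1
--                 continue
--             if ch == ")":
--                 while out and out[-1] == " ":
--                     out.pop()
--                 out.append(ch)
--                 i += 1
--                 continue
--         out.append(ch)
--         i += 1
--     return "".join(out)
-- ===== SOURCE B (Python) =====
-- def squeeze_paren_spaces(code: str) -> str:
--     """Remove spaces immediately after '(' and before ')' outside quoted strings."""
--     out = []
--     in_single = False
--     in_double = False
--     pending = 0        # spaces seen outside quotes, not yet emitted
--     suppress = False   # True right after an unquoted '(' (and over its spaces)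
--     for ch in code:
--         if in_single or in_double:
--             out.append(ch)
--             if in_single and ch == "'":
--                 in_single = False
--             elif in_double and ch == '"':
--                 in_double = False
--         elif ch == " ":
--             if not suppress:
--                 pending += 1
--         else:
--             if ch == ")":
--                 pending = 0
--             else:
--                 out.append(" " * pending)
--                 pending = 0
--             out.append(ch)
--             suppress = ch == "("
--             if ch == "'":
--                 in_single = True
--             elif ch == '"':
--                 in_double = True
--     out.append(" " * pending)
--     return "".join(out)
-- ===== Notes on version B (the rewrite author's own statement) =====
-- stated objective: alternative
-- what changed: Replaces A's index-driven loop, which uses an inner look-ahead loop after an opening parenthesis and pops trailing spaces back off the output before a closing one, by a strictly forward single pass that buffers outside-quote spaces in a pending counter plus a suppress flag and never re-reads input or mutates emitted output.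
import Mathlib
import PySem

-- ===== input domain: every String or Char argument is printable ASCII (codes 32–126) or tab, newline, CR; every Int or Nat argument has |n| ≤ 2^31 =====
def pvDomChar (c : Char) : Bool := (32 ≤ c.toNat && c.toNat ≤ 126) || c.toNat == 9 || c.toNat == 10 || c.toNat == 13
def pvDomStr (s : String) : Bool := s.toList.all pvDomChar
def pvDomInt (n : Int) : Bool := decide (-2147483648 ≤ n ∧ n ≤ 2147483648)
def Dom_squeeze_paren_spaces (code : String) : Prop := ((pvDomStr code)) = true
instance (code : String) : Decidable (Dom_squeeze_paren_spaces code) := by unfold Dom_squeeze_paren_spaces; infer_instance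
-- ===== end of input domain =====

-- B replaces A's pop-from-output and inner skip loop by a strictly forward pass that
-- buffers pending spaces and a suppress flag (objective: alternative decomposition, same cost).

-- ===== PORT A =====

-- A's two inner while loops ("skip spaces in the input" and "pop trailing spaces of out");
-- on the reversed output accumulator popping trailing spaces is dropping leading ones,
-- so both loops are this recursion.
def dropSpacesA : List Char → List Char
  | [] => []
  | c :: cs => if c = ' ' then dropSpacesA cs else c :: cs

-- needed by goA's termination (cited in decreasing_by)
theorem dropSpacesA_length_le (cs : List Char) : (dropSpacesA cs).length ≤ cs.length := by
  induction cs with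
  | nil => simp [dropSpacesA]
  | cons c cs ih =>
    simp only [dropSpacesA]
    split
    · exact Nat.le_succ_of_le ih
    · simp

-- A's main while loop; `out` is A's output list reversed (append = cons, pop = drop head).
def goA : List Char → List Char → Bool → Bool → List Char
  | [], out, _, _ => out
  | c :: cs, out, s, d =>
    if c = '\'' ∧ d = false then goA cs (c :: out) (!s) d
    else if c = '"' ∧ s = false then goA cs (c :: out) s (!d)
    else if s = false ∧ d = false ∧ c = '(' then goA (dropSpacesA cs) (c :: out) s d
    else if s = false ∧ d = false ∧ c = ')' then goA cs (c :: dropSpacesA out) s d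
    else goA cs (c :: out) s d
  termination_by cs _ _ _ => cs.length
  decreasing_by
  · simp
  · simp
  · exact Nat.lt_succ_of_le (dropSpacesA_length_le cs)
  · simp
  · simp

def squeeze_paren_spaces (code : String) : String :=
  String.mk (goA code.toList [] false false).reverse

-- ===== PORT B =====

-- B's single forward loop; `acc` is the output reversed, `p` the pending space count,
-- `sup` the suppress flag; the final `List.replicate p` is Source B's trailing flush.
def goB : List Char → List Char → Bool → Bool → Nat → Bool → List Char
  | [], acc, _, _, p, _ => List.replicate p ' ' ++ acc
  | c :: cs, acc, s, d, p, sup =>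
    if s = true ∨ d = true then
      if s = true ∧ c = '\'' then goB cs (c :: acc) false d p sup
      else if d = true ∧ c = '"' then goB cs (c :: acc) s false p sup
      else goB cs (c :: acc) s d p sup
    else if c = ' ' then
      goB cs acc s d (if sup then p else p + 1) sup
    else
      let acc' := if c = ')' then c :: acc else c :: (List.replicate p ' ' ++ acc)
      goB cs acc' (if c = '\'' then true else s) (if c = '"' then true else d) 0 (c = '(')

def squeeze_paren_spaces_alt (code : String) : String :=
  String.mk (goB code.toList [] false false 0 false).reverse

-- ===== PRECONDITION & SPEC =====
def Spec_squeeze_paren_spaces (code : String) (out : String) : Prop := out = squeeze_paren_spaces_alt code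
instance (code : String) (out : String) : Decidable (Spec_squeeze_paren_spaces code out) := by unfold Spec_squeeze_paren_spaces; infer_instance

-- ===== CLAIM (what is proved, stated in full; the proofs are below) =====
def Claim_equal_squeeze_paren_spaces : Prop := ∀ (code : String), Dom_squeeze_paren_spaces code → Spec_squeeze_paren_spaces code (squeeze_paren_spaces code)

-- ===== LEMMAS AND PROOFS =====

-- `ok acc`: the (reversed) output does not start with a space
def okAcc : List Char → Prop
  | [] => True
  | c :: _ => c ≠ ' '

theorem dropSpacesA_ok (acc : List Char) (h : okAcc acc) : dropSpacesA acc = acc := by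
  cases acc with
  | nil => rfl
  | cons c cs =>
    simp only [okAcc] at h
    simp [dropSpacesA, h]

theorem dropSpacesA_replicate (p : Nat) (acc : List Char) (h : okAcc acc) :
    dropSpacesA (List.replicate p ' ' ++ acc) = acc := by
  induction p with
  | zero => simpa using dropSpacesA_ok acc h
  | succ p ih => simpa [List.replicate_succ, dropSpacesA] using ih

-- B with suppress on skips exactly the spaces A's inner loop skips
theorem goB_skip (cs : List Char) (acc : List Char) :
    goB cs acc false false 0 true = goB (dropSpacesA cs) acc false false 0 true := by
  induction cs with
  | nil => rfl
  | cons c cs ih =>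
    by_cases hc : c = ' '
    · simpa [goB, dropSpacesA, hc] using ih
    · simp [dropSpacesA, hc]

-- on a space-free head (or empty input) the suppress flag is irrelevant
theorem goB_sup_irrel (cs : List Char) (acc : List Char)
    (h : cs = [] ∨ ∃ c cs', cs = c :: cs' ∧ c ≠ ' ') :
    goB cs acc false false 0 true = goB cs acc false false 0 false := by
  rcases h with h | ⟨c, cs', rfl, hc⟩
  · subst h; rfl
  · simp [goB, hc]

theorem dropSpacesA_shape (cs : List Char) :
    dropSpacesA cs = [] ∨ ∃ c cs', dropSpacesA cs = c :: cs' ∧ c ≠ ' ' := by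
  induction cs with
  | nil => exact Or.inl rfl
  | cons c cs ih =>
    by_cases hc : c = ' '
    · simpa [dropSpacesA, hc] using ih
    · exact Or.inr ⟨c, cs, by simp [dropSpacesA, hc], hc⟩

-- main invariant: A's output is B's accumulator with the pending spaces on top
theorem goA_eq_goB (n : Nat) : ∀ (cs : List Char), cs.length ≤ n →
    ∀ (acc : List Char) (s d : Bool) (p : Nat),
    ¬ (s = true ∧ d = true) →
    ((s = true ∨ d = true) → p = 0) →
    ((s = false ∧ d = false) → okAcc acc) →
    goA cs (List.replicate p ' ' ++ acc) s d = goB cs acc s d p false := by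
  induction n with
  | zero =>
    intro cs hlen acc s d p _ _ _
    have : cs = [] := List.eq_nil_of_length_eq_zero (Nat.le_zero.mp hlen)
    subst this; simp [goA, goB]
  | succ n ih =>
    intro cs hlen acc s d p hsd hq hok
    cases cs with
    | nil => simp [goA, goB]
    | cons c cs =>
      have hlen' : cs.length ≤ n := Nat.lt_succ_iff.mp (by simpa using hlen)
      by_cases h1 : c = '\'' ∧ d = false
      · -- single-quote char, not inside a double quote
        cases hs : s with
        | true =>
          have hp : p = 0 := hq (Or.inl hs)
          subst hp
          rw [goA, goB]
          simp only [h1.1, h1.2, hs]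
          simpa [h1.1] using ih cs hlen' (c :: acc) false false 0 (by simp) (by simp) (by simp [okAcc, h1.1])
        | false =>
          rw [goA, goB]
          simp only [h1.1, h1.2, hs]
          have := ih cs hlen' (c :: List.replicate p ' ' ++ acc) true false 0 (by simp) (by simp)
            (by simp)
          simpa [h1.1] using this
      · by_cases h2 : c = '"' ∧ s = false
        · cases hd : d with
          | true =>
            have hp : p = 0 := hq (Or.inr hd)
            subst hp
            rw [goA, goB]
            simp only [h1, h2.1, h2.2, hd]
            simpa [h2.1] using ih cs hlen' (c :: acc) false false 0 (by simp) (by simp) (by simp [okAcc, h2.1])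
          | false =>
            rw [goA, goB]
            simp only [h1, h2.1, h2.2, hd]
            have := ih cs hlen' (c :: List.replicate p ' ' ++ acc) false true 0 (by simp) (by simp)
              (by simp)
            simpa [h2.1] using this
        · by_cases hin : s = true ∨ d = true
          · -- inside a quoted string: both sides just append
            have hp : p = 0 := hq hin
            subst hp
            have hA : goA (c :: cs) acc s d = goA cs (c :: acc) s d := by
              rw [goA]
              have hns : ¬ (s = false ∧ d = false ∧ c = '(') := by rintro ⟨a, b, _⟩; simp [a, b] at hin
              have hns' : ¬ (s = false ∧ d = false ∧ c = ')') := by rintro ⟨a, b, _⟩; simp [a, b] at hin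
              simp [h1, h2, hns, hns']
            have hB : goB (c :: cs) acc s d 0 false = goB cs (c :: acc) s d 0 false := by
              rw [goB]
              have hq1 : ¬ (s = true ∧ c = '\'') := by
                rintro ⟨a, b⟩
                have hd0 : d = false := by cases d with | false => rfl | true => exact absurd ⟨a, rfl⟩ hsd
                exact h1 ⟨b, hd0⟩
              have hq2 : ¬ (d = true ∧ c = '"') := by
                rintro ⟨a, b⟩
                have hs0 : s = false := by cases s with | false => rfl | true => exact absurd ⟨rfl, a⟩ hsd
                exact h2 ⟨b, hs0⟩
              simp [hin, hq1, hq2]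
            simp only [List.replicate_zero, List.nil_append]
            rw [hA, hB]
            have hok' : (s = false ∧ d = false) → okAcc (c :: acc) := by
              rintro ⟨a, b⟩; simp [a, b] at hin
            simpa using ih cs hlen' (c :: acc) s d 0 hsd (by simp) hok'
          · -- outside quotes
            have hs : s = false := by cases s with | false => rfl | true => exact absurd (Or.inl rfl) hin
            have hd : d = false := by cases d with | false => rfl | true => exact absurd (Or.inr rfl) hin
            subst hs; subst hd
            have hcq1 : c ≠ '\'' := fun h => h1 ⟨h, rfl⟩
            have hcq2 : c ≠ '"' := fun h => h2 ⟨h, rfl⟩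
            by_cases hpar : c = '('
            · subst hpar
              rw [goA, goB]
              simp only [Char.reduceEq, and_true, true_and, and_self, if_true, if_false,
                Bool.false_eq_true, or_self, ite_false, ite_true, decide_true, and_false,
                false_and, not_false_eq_true]
              rw [goB_skip, goB_sup_irrel _ _ (dropSpacesA_shape cs)]
              exact ih (dropSpacesA cs) (le_trans (dropSpacesA_length_le cs) hlen')
                ('(' :: (List.replicate p ' ' ++ acc)) false false 0 (by simp) (by simp)
                (by intro _; simp [okAcc])
            · by_cases hrp : c = ')'
              · subst hrp
                rw [goA, goB]
                simp only [Char.reduceEq, and_true, true_and, and_self, if_true, if_false,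
                  Bool.false_eq_true, or_self, ite_false, ite_true, decide_false, and_false,
                  false_and, not_false_eq_true]
                rw [dropSpacesA_replicate p acc (hok ⟨rfl, rfl⟩)]
                exact ih cs hlen' (')' :: acc) false false 0 (by simp) (by simp)
                  (by intro _; simp [okAcc])
              · by_cases hsp : c = ' '
                · subst hsp
                  rw [goA, goB]
                  simp only [Char.reduceEq, and_true, true_and, and_self, if_true, if_false,
                    Bool.false_eq_true, or_self, ite_false, ite_true, and_false,
                    false_and, not_false_eq_true]
                  have := ih cs hlen' acc false false (p + 1) (by simp) (by simp) hok
                  simpa [List.replicate_succ] using this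
                · rw [goA, goB]
                  simp only [hcq1, hcq2, hpar, hrp, hsp, and_true, true_and, and_self, if_true,
                    if_false, Bool.false_eq_true, or_self, ite_false, ite_true, and_false,
                    false_and, not_false_eq_true, decide_eq_true_eq]
                  have := ih cs hlen' (c :: (List.replicate p ' ' ++ acc)) false false 0 (by simp)
                    (by simp) (by intro _; simpa [okAcc] using hsp)
                  simpa [hcq1, hcq2, hpar, hrp, hsp] using this

-- ===== VERDICT (by name: the statement is the Claim_ definition above) =====
theorem squeeze_paren_spaces_spec : Claim_equal_squeeze_paren_spaces := by
  intro code _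
  unfold Spec_squeeze_paren_spaces squeeze_paren_spaces squeeze_paren_spaces_alt
  have := goA_eq_goB code.toList.length code.toList le_rfl [] false false 0
    (by simp) (by simp) (by intro _; trivial)
  simp only [List.replicate_zero, List.nil_append] at this
  rw [this]
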